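-- pv_equiv track=rewrite | github.com/muhdismailm/SignifyEd-V4 | backend/app.py | reorder_for_isl
-- ===== SOURCE A (Python) =====
-- def reorder_for_isl(lemmatized_tokens, pos_tags):
--
--     time_words, obj_words, verb_words = [], [], []
--
--     for i, (word, tag) in enumerate(pos_tags):
--
--         lemma = lemmatized_tokens[i]
--
--         if lemma.lower() in ["today", "tomorrow", "yesterday"]:
--             time_words.append(lemma)
--
--         elif tag.startswith("V"):
--             verb_words.append(lemma)
--
--         else:
--             obj_words.append(lemma)
--
--     negation = [w for w in obj_words if w == "not"]
--     obj_words = [w for w in obj_words if w != "not"]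
--
--     return time_words + obj_words + verb_words + negation
-- ===== SOURCE B (Python) =====
-- def reorder_for_isl(lemmatized_tokens, pos_tags):
--     # Assign each index a category rank (time=0, object=1, verb=2, negation=3)
--     # and stably sort the indices by rank; stability preserves the original
--     # relative order inside each category, which is exactly the ISL order.
--     def rank(i):
--         lemma = lemmatized_tokens[i]
--         if lemma.lower() in ("today", "tomorrow", "yesterday"):
--             return 0
--         if pos_tags[i][1].startswith("V"):
--             return 2
--         if lemma == "not":
--             return 3
--         return 1
--     return [lemmatized_tokens[i] for i in sorted(range(len(pos_tags)), key=rank)]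
-- ===== Notes on version B (the rewrite author's own statement) =====
-- stated objective: alternative
-- what changed: B replaces A's three-way partition loop plus two post-hoc 'not' filter passes with a stable sort of the indices by a four-valued category rank (time=0, object=1, verb=2, negation=3); stability preserves the original order within each category, which is exactly A's output order.
import Mathlib
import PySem

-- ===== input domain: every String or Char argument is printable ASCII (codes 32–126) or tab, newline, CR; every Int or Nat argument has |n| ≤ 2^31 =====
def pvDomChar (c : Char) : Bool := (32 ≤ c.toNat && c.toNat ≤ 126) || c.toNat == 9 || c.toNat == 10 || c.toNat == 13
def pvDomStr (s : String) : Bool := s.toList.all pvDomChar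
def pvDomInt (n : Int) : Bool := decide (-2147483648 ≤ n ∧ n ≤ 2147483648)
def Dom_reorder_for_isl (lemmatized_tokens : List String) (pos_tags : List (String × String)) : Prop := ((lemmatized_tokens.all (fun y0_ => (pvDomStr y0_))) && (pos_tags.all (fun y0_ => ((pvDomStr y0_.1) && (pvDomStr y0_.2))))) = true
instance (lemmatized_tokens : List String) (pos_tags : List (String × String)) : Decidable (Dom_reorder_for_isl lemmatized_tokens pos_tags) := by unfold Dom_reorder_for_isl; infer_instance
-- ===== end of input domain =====

-- B change (objective: alternative): instead of A's partition into three lists plus two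
-- post-hoc filter passes, B assigns each index a category rank (time=0, object=1, verb=2,
-- negation=3) and stably sorts the indices by rank; stability keeps the original order
-- inside each category, which is exactly the ISL order A produces.

-- ===== PORT A =====
-- A's loop over enumerate(pos_tags): three accumulators; lemmatized_tokens[i] (in range under Pre_).
def reorderA_loop (lem : List String) (ps : List (String × String)) (i : Nat)
    (t o v : List String) : List String × List String × List String :=
  match ps with
  | [] => (t, o, v)
  | (_, tag) :: rest =>
    let lm := (PySem.List.pyGet? lem (Int.ofNat i)).getD ""
    if PySem.Str.lower lm ∈ (["today", "tomorrow", "yesterday"] : List String) then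
      reorderA_loop lem rest (i + 1) (t ++ [lm]) o v
    else if PySem.Str.startswith tag "V" then
      reorderA_loop lem rest (i + 1) t o (v ++ [lm])
    else
      reorderA_loop lem rest (i + 1) t (o ++ [lm]) v

def reorder_for_isl (lemmatized_tokens : List String) (pos_tags : List (String × String)) : List String :=
  match reorderA_loop lemmatized_tokens pos_tags 0 [] [] [] with
  | (t, o, v) =>
    let negation := o.filter (fun w => w == "not")
    let obj := o.filter (fun w => w != "not")
    t ++ obj ++ v ++ negation

-- ===== PORT B =====
-- B's rank(i): the ISL category of index i (time=0, object=1, verb=2, negation=3).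
def rankB (lem : List String) (ps : List (String × String)) (i : Int) : Nat :=
  let lm := (PySem.List.pyGet? lem i).getD ""
  if PySem.Str.lower lm ∈ (["today", "tomorrow", "yesterday"] : List String) then 0
  else if PySem.Str.startswith (((PySem.List.pyGet? ps i).getD ("", "")).2) "V" then 2
  else if lm == "not" then 3
  else 1

-- sorted(range(len(pos_tags)), key=rank) is a STABLE sort, ported by PySem.List.sorted.
def reorder_for_isl_alt (lemmatized_tokens : List String) (pos_tags : List (String × String)) : List String :=
  (PySem.List.sorted (PySem.List.pyRange 0 (pos_tags.length) 1)
      (rankB lemmatized_tokens pos_tags) false).map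
    (fun i => (PySem.List.pyGet? lemmatized_tokens i).getD "")

-- ===== PRECONDITION & SPEC =====
-- Pre_ excludes exactly the inputs where Python A raises IndexError (pos_tags longer than
-- lemmatized_tokens); B raises there too.
def Pre_reorder_for_isl (lemmatized_tokens : List String) (pos_tags : List (String × String)) : Prop :=
  pos_tags.length ≤ lemmatized_tokens.length
instance (lemmatized_tokens : List String) (pos_tags : List (String × String)) : Decidable (Pre_reorder_for_isl lemmatized_tokens pos_tags) := by unfold Pre_reorder_for_isl; infer_instance

def pvWitness_reorder_for_isl : List String × (List (String × String)) :=
  (["tomorrow", "I", "not", "go"], [("tomorrow", "NN"), ("I", "PRP"), ("not", "RB"), ("go", "VB")])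

def Spec_reorder_for_isl (lemmatized_tokens : List String) (pos_tags : List (String × String)) (out : List String) : Prop := out = reorder_for_isl_alt lemmatized_tokens pos_tags
instance (lemmatized_tokens : List String) (pos_tags : List (String × String)) (out : List String) : Decidable (Spec_reorder_for_isl lemmatized_tokens pos_tags out) := by unfold Spec_reorder_for_isl; infer_instance

-- ===== CLAIM (what is proved, stated in full; the proofs are below) =====
def Claim_equal_reorder_for_isl : Prop := ∀ (lemmatized_tokens : List String) (pos_tags : List (String × String)), Dom_reorder_for_isl lemmatized_tokens pos_tags → Pre_reorder_for_isl lemmatized_tokens pos_tags → Spec_reorder_for_isl lemmatized_tokens pos_tags (reorder_for_isl lemmatized_tokens pos_tags)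

-- ===== LEMMAS AND PROOFS =====

-- insertBy skips a prefix none of whose elements x goes before.
theorem insertBy_append_not {α : Type} (before : α → α → Bool) (x : α) (l1 l2 : List α)
    (h : ∀ y ∈ l1, before x y = false) :
    PySem.List.insertBy before x (l1 ++ l2) = l1 ++ PySem.List.insertBy before x l2 := by
  induction l1 with
  | nil => simp
  | cons a l ih =>
    have ha := h a (List.mem_cons_self ..)
    simp [PySem.List.insertBy, ha, ih fun y hy => h y (List.mem_cons_of_mem _ hy)]

-- insertBy puts x in front of a list x goes before entirely.
theorem insertBy_cons_all {α : Type} (before : α → α → Bool) (x : α) (l : List α)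
    (h : ∀ y ∈ l, before x y = true) :
    PySem.List.insertBy before x l = x :: l := by
  cases l with
  | nil => simp [PySem.List.insertBy]
  | cons a l => simp [PySem.List.insertBy, h a (List.mem_cons_self ..)]

-- Stable sort by a rank with values < 4 is the concatenation of the four rank buckets.
theorem foldl_insertBy_buckets {α : Type} (key : α → Nat) :
    ∀ (xs b0 b1 b2 b3 : List α),
      (∀ a ∈ xs, key a < 4) →
      (∀ a ∈ b0, key a = 0) → (∀ a ∈ b1, key a = 1) →
      (∀ a ∈ b2, key a = 2) → (∀ a ∈ b3, key a = 3) →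
      xs.foldl (fun acc x => PySem.List.insertBy (fun a b => decide (key a < key b)) x acc)
          (b0 ++ b1 ++ b2 ++ b3)
        = (b0 ++ xs.filter (fun a => key a == 0)) ++ (b1 ++ xs.filter (fun a => key a == 1))
          ++ (b2 ++ xs.filter (fun a => key a == 2)) ++ (b3 ++ xs.filter (fun a => key a == 3)) := by
  intro xs
  induction xs with
  | nil => intro b0 b1 b2 b3 _ _ _ _ _; simp
  | cons x xs ih =>
    intro b0 b1 b2 b3 hxs h0 h1 h2 h3
    have hx := hxs x (List.mem_cons_self ..)
    have hxs' : ∀ a ∈ xs, key a < 4 := fun a ha => hxs a (List.mem_cons_of_mem _ ha)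
    simp only [List.foldl_cons]
    interval_cases hk : key x
    · have hstep : PySem.List.insertBy (fun a b => decide (key a < key b)) x (b0 ++ b1 ++ b2 ++ b3)
          = (b0 ++ [x]) ++ b1 ++ b2 ++ b3 := by
        rw [List.append_assoc b0 b1, List.append_assoc b0, insertBy_append_not _ _ b0]
        · rw [insertBy_cons_all]
          · simp
          · intro y hy
            simp only [List.mem_append] at hy
            rcases hy with (hy | hy) | hy
            · simp [h1 y hy, hk]
            · simp [h2 y hy, hk]
            · simp [h3 y hy, hk]
        · intro y hy; simp [h0 y hy, hk]
      rw [hstep, ih (b0 ++ [x]) b1 b2 b3 hxs'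
        (by intro a ha; rcases List.mem_append.1 ha with ha | ha
            · exact h0 a ha
            · simpa [List.mem_singleton.1 ha] using hk) h1 h2 h3]
      simp [hk]
    · have hstep : PySem.List.insertBy (fun a b => decide (key a < key b)) x (b0 ++ b1 ++ b2 ++ b3)
          = b0 ++ (b1 ++ [x]) ++ b2 ++ b3 := by
        rw [List.append_assoc (b0 ++ b1), insertBy_append_not _ _ (b0 ++ b1)]
        · rw [insertBy_cons_all]
          · simp
          · intro y hy
            simp only [List.mem_append] at hy
            rcases hy with hy | hy
            · simp [h2 y hy, hk]
            · simp [h3 y hy, hk]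
        · intro y hy
          simp only [List.mem_append] at hy
          rcases hy with hy | hy
          · simp [h0 y hy, hk]
          · simp [h1 y hy, hk]
      rw [hstep, ih b0 (b1 ++ [x]) b2 b3 hxs' h0
        (by intro a ha; rcases List.mem_append.1 ha with ha | ha
            · exact h1 a ha
            · simpa [List.mem_singleton.1 ha] using hk) h2 h3]
      simp [hk]
    · have hstep : PySem.List.insertBy (fun a b => decide (key a < key b)) x (b0 ++ b1 ++ b2 ++ b3)
          = b0 ++ b1 ++ (b2 ++ [x]) ++ b3 := by
        rw [insertBy_append_not _ _ (b0 ++ b1 ++ b2)]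
        · rw [insertBy_cons_all]
          · simp
          · intro y hy; simp [h3 y hy, hk]
        · intro y hy
          simp only [List.mem_append] at hy
          rcases hy with (hy | hy) | hy
          · simp [h0 y hy, hk]
          · simp [h1 y hy, hk]
          · simp [h2 y hy, hk]
      rw [hstep, ih b0 b1 (b2 ++ [x]) b3 hxs' h0 h1
        (by intro a ha; rcases List.mem_append.1 ha with ha | ha
            · exact h2 a ha
            · simpa [List.mem_singleton.1 ha] using hk) h3]
      simp [hk]
    · have hstep : PySem.List.insertBy (fun a b => decide (key a < key b)) x (b0 ++ b1 ++ b2 ++ b3)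
          = b0 ++ b1 ++ b2 ++ (b3 ++ [x]) := by
        rw [PySem.List.insertBy_of_forall_not_before]
        · simp
        · intro y hy
          simp only [List.mem_append] at hy
          rcases hy with ((hy | hy) | hy) | hy
          · simp [h0 y hy, hk]
          · simp [h1 y hy, hk]
          · simp [h2 y hy, hk]
          · simp [h3 y hy, hk]
      rw [hstep, ih b0 b1 b2 (b3 ++ [x]) hxs' h0 h1 h2
        (by intro a ha; rcases List.mem_append.1 ha with ha | ha
            · exact h3 a ha
            · simpa [List.mem_singleton.1 ha] using hk)]
      simp [hk]

theorem sorted_buckets {α : Type} (key : α → Nat) (xs : List α) (h : ∀ a ∈ xs, key a < 4) :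
    PySem.List.sorted xs key false
      = xs.filter (fun a => key a == 0) ++ xs.filter (fun a => key a == 1)
        ++ xs.filter (fun a => key a == 2) ++ xs.filter (fun a => key a == 3) := by
  have := foldl_insertBy_buckets key xs [] [] [] [] h
    (by simp) (by simp) (by simp) (by simp)
  simpa [PySem.List.sorted_eq_foldl_insertBy] using this

-- rankB only takes the values 0,1,2,3.
theorem rank_lt4 (lem : List String) (ps : List (String × String)) (i : Int) :
    rankB lem ps i < 4 := by
  simp only [rankB]; split_ifs <;> omega

-- A's loop, started at index k on the corresponding suffix of pos_tags, appends to each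
-- accumulator exactly the tokens of the corresponding rank buckets over indices k..n-1.
theorem A_loop_char (lem : List String) (ps : List (String × String)) :
    ∀ (suffix : List (String × String)) (k : Nat) (t o v : List String),
      suffix = ps.drop k →
      reorderA_loop lem suffix k t o v =
        (t ++ ((PySem.List.pyRange (k : Int) (ps.length : Int) 1).filter
            (fun i => rankB lem ps i == 0)).map (fun i => (PySem.List.pyGet? lem i).getD ""),
         o ++ ((PySem.List.pyRange (k : Int) (ps.length : Int) 1).filter
            (fun i => rankB lem ps i == 1 || rankB lem ps i == 3)).map (fun i => (PySem.List.pyGet? lem i).getD ""),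
         v ++ ((PySem.List.pyRange (k : Int) (ps.length : Int) 1).filter
            (fun i => rankB lem ps i == 2)).map (fun i => (PySem.List.pyGet? lem i).getD "")) := by
  intro suffix
  induction suffix with
  | nil =>
    intro k t o v heq
    have hlen : ps.length ≤ k := by
      by_contra h
      have := List.drop_eq_nil_iff.1 heq.symm
      omega
    rw [PySem.List.pyRange_one_eq_nil (by exact_mod_cast hlen)]
    simp [reorderA_loop]
  | cons hd rest ih =>
    intro k t o v heq
    obtain ⟨w, tag⟩ := hd
    have hk : k < ps.length := by
      by_contra h
      rw [List.drop_eq_nil_of_le (by omega)] at heq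
      simp at heq
    have hget : ps[k]? = some (w, tag) := by
      have := congrArg List.head? heq
      simpa [List.head?_drop] using this.symm
    have hrest : rest = ps.drop (k + 1) := by
      have := congrArg List.tail heq
      simpa [List.tail_drop] using this
    have htag : ((PySem.List.pyGet? ps (k : Int)).getD ("", "")).2 = tag := by
      simp [PySem.List.pyGet?_natCast, hget]
    rw [PySem.List.pyRange_one_cons (by exact_mod_cast hk)]
    show reorderA_loop lem ((w, tag) :: rest) k t o v = _
    simp only [reorderA_loop]
    set lm := (PySem.List.pyGet? lem (Int.ofNat k)).getD "" with hlm
    have hlm' : (PySem.List.pyGet? lem (k : Int)).getD "" = lm := rfl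
    by_cases hc0 : PySem.Str.lower lm ∈ (["today", "tomorrow", "yesterday"] : List String)
    · have hr : rankB lem ps (k : Int) = 0 := by
        unfold rankB; rw [hlm']; simp [hc0]
      rw [if_pos hc0, ih (k + 1) (t ++ [lm]) o v hrest]
      simp [hr, hlm]
    · by_cases hc2 : PySem.Str.startswith tag "V"
      · have hr : rankB lem ps (k : Int) = 2 := by
          unfold rankB; rw [hlm', htag]; simp [hc0, PySem.Str.startswith] at hc2 ⊢; simp [hc2]
        rw [if_neg hc0, if_pos hc2, ih (k + 1) t o (v ++ [lm]) hrest]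
        simp [hr, hlm]
      · have hr : rankB lem ps (k : Int) = 3 ∨ rankB lem ps (k : Int) = 1 := by
          unfold rankB; rw [hlm', htag]
          simp [PySem.Str.startswith] at hc2
          by_cases hn : lm == "not" <;> simp [hc0, hc2, hn, PySem.Str.startswith]
        rw [if_neg hc0, if_neg hc2, ih (k + 1) t (o ++ [lm]) v hrest]
        rcases hr with hr | hr <;> simp [hr, hlm]

-- Pointwise: inside the mixed object/negation bucket, being "not" is having rank 3.
theorem rank_token_not (lem : List String) (ps : List (String × String)) (i : Int) :
    (((PySem.List.pyGet? lem i).getD "" == "not")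
      && (rankB lem ps i == 1 || rankB lem ps i == 3)) = (rankB lem ps i == 3) := by
  simp only [rankB]; split_ifs <;> simp_all

theorem rank_token_yes (lem : List String) (ps : List (String × String)) (i : Int) :
    (((PySem.List.pyGet? lem i).getD "" != "not")
      && (rankB lem ps i == 1 || rankB lem ps i == 3)) = (rankB lem ps i == 1) := by
  simp only [rankB]; split_ifs <;> simp_all

-- ===== VERDICT (by name: the statement is the Claim_ definition above) =====
theorem reorder_for_isl_spec : Claim_equal_reorder_for_isl := by
  intro lem ps _ _
  unfold Spec_reorder_for_isl reorder_for_isl reorder_for_isl_alt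
  rw [A_loop_char lem ps ps 0 [] [] [] (by simp)]
  rw [sorted_buckets _ _ (fun i _ => rank_lt4 lem ps i)]
  simp only [Nat.cast_zero, List.nil_append, List.map_append, List.filter_map,
    List.filter_filter, Function.comp_def]
  rw [funext (rank_token_not lem ps), funext (rank_token_yes lem ps)]
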